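-- pv_equiv track=rewrite | github.com/emanlove/advent-of-code | 2025/solved/day4.py | find_accessible_rolls
-- ===== SOURCE A (Python) =====
-- def find_accessible_rolls(flattened_map, nrows, ncols):
--     accessible_rolls = []
--
--     indx_around = [(-1,-1),(-1,0),(-1,+1),(0,-1),(0,+1),(+1,-1),(+1,0),(+1,+1)]  # [(row,col)]
--
--     for pos,item in enumerate(flattened_map):
--         if item == '.':
--             accessible_rolls.append(0)
--             continue
--         surrounding_spots = []
--         for indx in indx_around:
--             rc = (pos//ncols,pos%ncols)
--             check_row = rc[0]+indx[0]
--             check_col = rc[1]+indx[1]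
--             this_pos = check_row*ncols + check_col
--             if (0 <= check_row < nrows) and (0 <= check_col < ncols) and flattened_map[this_pos]=='@':
--                 surrounding_spots.append(1)
--             else:
--                 surrounding_spots.append(0)
--
--         if sum(surrounding_spots) < 4:
--             accessible_rolls.append(1)
--         else:
--             accessible_rolls.append(0)
--
--     # print_map(accessible_rolls, nrows, ncols)
--     return accessible_rolls
-- ===== SOURCE B (Python) =====
-- def find_accessible_rolls(flattened_map, nrows, ncols):
--     offsets = [(-1,-1),(-1,0),(-1,1),(0,-1),(0,1),(1,-1),(1,0),(1,1)]
--     ncells = nrows * ncols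
--     counts = {}
--     for pos, item in enumerate(flattened_map):
--         if item == '@' and pos < ncells:
--             r, c = divmod(pos, ncols)
--             for dr, dc in offsets:
--                 nr, nc = r + dr, c + dc
--                 if 0 <= nr < nrows and 0 <= nc < ncols:
--                     t = nr * ncols + nc
--                     counts[t] = counts.get(t, 0) + 1
--     return [0 if item == '.' else (1 if counts.get(pos, 0) < 4 else 0)
--             for pos, item in enumerate(flattened_map)]
-- ===== Notes on version B (the rewrite author's own statement) =====
-- stated objective: alternative
-- what changed: Replaces A's per-cell gather of its 8 neighbors by a scatter pass that adds 1 into a neighbor-count dictionary for each in-bounds neighbor of every '@' grid cell, then a second pass emits 0/1 from a single dictionary lookup per cell.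
import Mathlib
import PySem

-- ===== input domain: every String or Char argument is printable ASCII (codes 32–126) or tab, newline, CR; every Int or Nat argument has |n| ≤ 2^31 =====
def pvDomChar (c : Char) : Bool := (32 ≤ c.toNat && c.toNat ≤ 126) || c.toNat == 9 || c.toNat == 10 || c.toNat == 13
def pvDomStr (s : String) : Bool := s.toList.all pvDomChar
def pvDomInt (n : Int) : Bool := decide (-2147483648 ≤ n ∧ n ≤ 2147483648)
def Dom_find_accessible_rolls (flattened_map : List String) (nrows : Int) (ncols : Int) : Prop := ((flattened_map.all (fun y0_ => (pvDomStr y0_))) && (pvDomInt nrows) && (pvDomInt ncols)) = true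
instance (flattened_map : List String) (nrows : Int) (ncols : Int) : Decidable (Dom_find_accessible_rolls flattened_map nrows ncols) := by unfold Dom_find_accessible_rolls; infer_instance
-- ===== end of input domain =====

-- B replaces A's per-cell gather of the 8 neighbors by a scatter pass building a neighbor-count
-- dictionary, then a second pass emitting 0/1 from that table (objective: alternative, same O(n) cost).


-- the literal offset list [(-1,-1),…,(+1,+1)] both Pythons share
def pvOffsets : List (Int × Int) :=
  [(-1,-1),(-1,0),(-1,1),(0,-1),(0,1),(1,-1),(1,0),(1,1)]

-- ===== PORT A =====
def find_accessible_rolls (flattened_map : List String) (nrows : Int) (ncols : Int) : List Int :=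
  (PySem.List.enumerate flattened_map).foldl (fun accessible_rolls pi =>
    if pi.2 = "." then accessible_rolls ++ [0]
    else
      let surrounding_spots := pvOffsets.foldl (fun s indx =>
        let rc := (PySem.Int.floordiv pi.1 ncols, PySem.Int.mod pi.1 ncols)
        let check_row := rc.1 + indx.1
        let check_col := rc.2 + indx.2
        let this_pos := check_row * ncols + check_col
        -- flattened_map[this_pos] via pyGetD: exact whenever the bounds guard holds (Pre_ below)
        if 0 ≤ check_row ∧ check_row < nrows ∧ 0 ≤ check_col ∧ check_col < ncols ∧
            PySem.List.pyGetD flattened_map this_pos "" = "@"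
        then s ++ [(1 : Int)] else s ++ [0]) []
      if surrounding_spots.sum < 4 then accessible_rolls ++ [1] else accessible_rolls ++ [0]) []

-- ===== PORT B =====
def find_accessible_rolls_alt (flattened_map : List String) (nrows : Int) (ncols : Int) : List Int :=
  let ncells := nrows * ncols
  let counts := (PySem.List.enumerate flattened_map).foldl (fun counts pi =>
    if pi.2 = "@" ∧ pi.1 < ncells then
      let r := PySem.Int.floordiv pi.1 ncols
      let c := PySem.Int.mod pi.1 ncols
      pvOffsets.foldl (fun counts d =>
        let nr := r + d.1
        let nc := c + d.2
        if 0 ≤ nr ∧ nr < nrows ∧ 0 ≤ nc ∧ nc < ncols then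
          PySem.Dict.insert counts (nr * ncols + nc)
            (PySem.Dict.getD counts (nr * ncols + nc) 0 + 1)
        else counts) counts
    else counts) (PySem.Dict.empty : PySem.Dict Int Int)
  (PySem.List.enumerate flattened_map).map (fun pi =>
    if pi.2 = "." then 0 else if PySem.Dict.getD counts pi.1 0 < 4 then 1 else 0)

-- ===== PRECONDITION & SPEC =====
-- flat index of the neighbor of cell q in direction d, and its in-grid bounds guard
def pvTgt (ncols : Int) (q : Int) (d : Int × Int) : Int :=
  (PySem.Int.floordiv q ncols + d.1) * ncols + (PySem.Int.mod q ncols + d.2)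

abbrev pvInB (nrows ncols : Int) (q : Int) (d : Int × Int) : Prop :=
  0 ≤ PySem.Int.floordiv q ncols + d.1 ∧ PySem.Int.floordiv q ncols + d.1 < nrows ∧
  0 ≤ PySem.Int.mod q ncols + d.2 ∧ PySem.Int.mod q ncols + d.2 < ncols

-- Pre_ is exactly where the Python A returns: with ncols = 0 every cell must be '.' (otherwise
-- pos//ncols raises ZeroDivisionError), and with ncols > 0 every in-grid neighbor index read for a
-- non-'.' cell must fall inside the list (otherwise flattened_map[this_pos] raises IndexError).
def Pre_find_accessible_rolls (flattened_map : List String) (nrows : Int) (ncols : Int) : Prop :=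
  (ncols = 0 → ∀ s ∈ flattened_map, s = ".") ∧
  (0 < ncols → ∀ j : Nat, j < flattened_map.length → flattened_map.getD j "" ≠ "." →
    ∀ d ∈ pvOffsets, pvInB nrows ncols (j : Int) d →
      pvTgt ncols (j : Int) d < (flattened_map.length : Int))
instance (flattened_map : List String) (nrows : Int) (ncols : Int) : Decidable (Pre_find_accessible_rolls flattened_map nrows ncols) := by unfold Pre_find_accessible_rolls; infer_instance

def pvWitness_find_accessible_rolls : List String × Int × Int := (["@", ".", "@", "@", "x", "@"], 2, 3)

def Spec_find_accessible_rolls (flattened_map : List String) (nrows : Int) (ncols : Int) (out : List Int) : Prop := out = find_accessible_rolls_alt flattened_map nrows ncols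
instance (flattened_map : List String) (nrows : Int) (ncols : Int) (out : List Int) : Decidable (Spec_find_accessible_rolls flattened_map nrows ncols out) := by unfold Spec_find_accessible_rolls; infer_instance

-- ===== CLAIM (what is proved, stated in full; the proofs are below) =====
def Claim_equal_find_accessible_rolls : Prop := ∀ (flattened_map : List String) (nrows : Int) (ncols : Int), Dom_find_accessible_rolls flattened_map nrows ncols → Pre_find_accessible_rolls flattened_map nrows ncols → Spec_find_accessible_rolls flattened_map nrows ncols (find_accessible_rolls flattened_map nrows ncols)

-- ===== LEMMAS AND PROOFS =====

-- A's per-cell gathered neighbor sum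
def pvGather (m : List String) (nrows ncols : Int) (q : Int) : Int :=
  (pvOffsets.map (fun d =>
    if pvInB nrows ncols q d ∧ PySem.List.pyGetD m (pvTgt ncols q d) "" = "@"
    then (1 : Int) else 0)).sum

-- how many bumps cell q contributes to table key k in B's scatter pass
def pvHits (nrows ncols : Int) (q k : Int) : Int :=
  (pvOffsets.map (fun d =>
    if pvInB nrows ncols q d ∧ pvTgt ncols q d = k then (1 : Int) else 0)).sum

theorem pv_sum_swap {α β : Type} (g : α → β → Int) (l1 : List α) (l2 : List β) :
    (l1.map (fun a => (l2.map (fun b => g a b)).sum)).sum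
      = (l2.map (fun b => (l1.map (fun a => g a b)).sum)).sum := by
  induction l1 with
  | nil => simp
  | cons a t ih => simp only [List.map_cons, List.sum_cons, ih, ← List.sum_map_add]

theorem pvTgt_bounds {nrows ncols q : Int} {d : Int × Int}
    (h : pvInB nrows ncols q d) : 0 ≤ pvTgt ncols q d ∧ pvTgt ncols q d < nrows * ncols := by
  obtain ⟨h1, h2, h3, h4⟩ := h
  unfold pvTgt
  set nr := PySem.Int.floordiv q ncols + d.1
  set nc := PySem.Int.mod q ncols + d.2
  constructor
  · nlinarith
  · nlinarith

-- one direction of neighbor symmetry; the other follows by applying it to the negated offset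
theorem pv_adj_fwd {nrows ncols j k : Int} {d : Int × Int} (hc : 0 < ncols)
    (hj0 : 0 ≤ j) (hjL : j < nrows * ncols)
    (h : pvInB nrows ncols j d ∧ pvTgt ncols j d = k) :
    pvInB nrows ncols k (-d.1, -d.2) ∧ pvTgt ncols k (-d.1, -d.2) = j := by
  obtain ⟨⟨h1, h2, h3, h4⟩, htgt⟩ := h
  unfold pvTgt at htgt
  have hdecomp := PySem.Int.floordiv_mul_add_mod j ncols
  have hjc0 := PySem.Int.mod_nonneg j hc
  have hjclt := PySem.Int.mod_lt j hc
  set jr := PySem.Int.floordiv j ncols with hjr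
  set jc := PySem.Int.mod j ncols with hjc
  have hjr0 : 0 ≤ jr := (PySem.Int.le_floordiv_iff_mul_le hc).mpr (by simpa using hj0)
  have hjrlt : jr < nrows := (PySem.Int.floordiv_lt_iff_lt_mul hc).mpr hjL
  have hkfd : PySem.Int.floordiv k ncols = jr + d.1 := by
    rw [PySem.Int.floordiv_eq_iff_of_pos hc]
    constructor <;> nlinarith
  have hkmd : PySem.Int.mod k ncols = jc + d.2 := by
    have := PySem.Int.floordiv_mul_add_mod k ncols
    rw [hkfd] at this
    nlinarith
  refine ⟨⟨?_, ?_, ?_, ?_⟩, ?_⟩ <;> simp only [pvTgt, hkfd, hkmd] <;> nlinarith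

-- scatter over any offset list: its effect on one dictionary entry
theorem pv_scatter_char (ds : List (Int × Int)) (c : PySem.Dict Int Int) (nrows ncols q k : Int) :
    (ds.foldl (fun counts d =>
        if 0 ≤ PySem.Int.floordiv q ncols + d.1 ∧ PySem.Int.floordiv q ncols + d.1 < nrows ∧
            0 ≤ PySem.Int.mod q ncols + d.2 ∧ PySem.Int.mod q ncols + d.2 < ncols then
          PySem.Dict.insert counts ((PySem.Int.floordiv q ncols + d.1) * ncols + (PySem.Int.mod q ncols + d.2))
            (PySem.Dict.getD counts ((PySem.Int.floordiv q ncols + d.1) * ncols + (PySem.Int.mod q ncols + d.2)) 0 + 1)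
        else counts) c).getD k 0
      = c.getD k 0 + (ds.map (fun d =>
          if pvInB nrows ncols q d ∧ pvTgt ncols q d = k then (1 : Int) else 0)).sum := by
  induction ds generalizing c with
  | nil => simp
  | cons d ds ih =>
    simp only [List.foldl_cons, List.map_cons, List.sum_cons]
    by_cases hd : pvInB nrows ncols q d
    · have hstep : (if 0 ≤ PySem.Int.floordiv q ncols + d.1 ∧ PySem.Int.floordiv q ncols + d.1 < nrows ∧
            0 ≤ PySem.Int.mod q ncols + d.2 ∧ PySem.Int.mod q ncols + d.2 < ncols then
          PySem.Dict.insert c ((PySem.Int.floordiv q ncols + d.1) * ncols + (PySem.Int.mod q ncols + d.2))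
            (PySem.Dict.getD c ((PySem.Int.floordiv q ncols + d.1) * ncols + (PySem.Int.mod q ncols + d.2)) 0 + 1)
        else c)
          = PySem.Dict.insert c (pvTgt ncols q d) (c.getD (pvTgt ncols q d) 0 + 1) := by
        have hd' : 0 ≤ PySem.Int.floordiv q ncols + d.1 ∧ PySem.Int.floordiv q ncols + d.1 < nrows ∧
            0 ≤ PySem.Int.mod q ncols + d.2 ∧ PySem.Int.mod q ncols + d.2 < ncols := hd
        rw [if_pos hd']
        rfl
      rw [hstep, ih]
      have hkey : (PySem.Dict.insert c (pvTgt ncols q d) (c.getD (pvTgt ncols q d) 0 + 1)).getD k 0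
          = c.getD k 0 + (if pvInB nrows ncols q d ∧ pvTgt ncols q d = k then (1 : Int) else 0) := by
        by_cases hk : pvTgt ncols q d = k
        · rw [if_pos ⟨hd, hk⟩, hk, PySem.Dict.getD_insert_self]
        · rw [if_neg (by tauto), PySem.Dict.getD_insert_of_ne _ _ _ (fun h => hk h.symm)]
          ring
      rw [hkey]; ring
    · have hstep : (if 0 ≤ PySem.Int.floordiv q ncols + d.1 ∧ PySem.Int.floordiv q ncols + d.1 < nrows ∧
            0 ≤ PySem.Int.mod q ncols + d.2 ∧ PySem.Int.mod q ncols + d.2 < ncols then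
          PySem.Dict.insert c ((PySem.Int.floordiv q ncols + d.1) * ncols + (PySem.Int.mod q ncols + d.2))
            (PySem.Dict.getD c ((PySem.Int.floordiv q ncols + d.1) * ncols + (PySem.Int.mod q ncols + d.2)) 0 + 1)
        else c) = c := by
        have hd' : ¬(0 ≤ PySem.Int.floordiv q ncols + d.1 ∧ PySem.Int.floordiv q ncols + d.1 < nrows ∧
            0 ≤ PySem.Int.mod q ncols + d.2 ∧ PySem.Int.mod q ncols + d.2 < ncols) := hd
        rw [if_neg hd']
      rw [hstep, ih, if_neg (by tauto)]
      ring

-- the whole scatter loop: dictionary entry k accumulates the bumps from every scattering cell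
theorem pv_counts_char (m : List String) (nrows ncols : Int) (s : Int) (c : PySem.Dict Int Int) (k : Int) :
    ((PySem.List.enumerate m s).foldl (fun counts pi =>
        if pi.2 = "@" ∧ pi.1 < nrows * ncols then
          pvOffsets.foldl (fun counts d =>
            if 0 ≤ PySem.Int.floordiv pi.1 ncols + d.1 ∧ PySem.Int.floordiv pi.1 ncols + d.1 < nrows ∧
                0 ≤ PySem.Int.mod pi.1 ncols + d.2 ∧ PySem.Int.mod pi.1 ncols + d.2 < ncols then
              PySem.Dict.insert counts ((PySem.Int.floordiv pi.1 ncols + d.1) * ncols + (PySem.Int.mod pi.1 ncols + d.2))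
                (PySem.Dict.getD counts ((PySem.Int.floordiv pi.1 ncols + d.1) * ncols + (PySem.Int.mod pi.1 ncols + d.2)) 0 + 1)
            else counts) counts
        else counts) c).getD k 0
      = c.getD k 0 + ((PySem.List.enumerate m s).map (fun pi =>
          if pi.2 = "@" ∧ pi.1 < nrows * ncols then pvHits nrows ncols pi.1 k else 0)).sum := by
  induction m generalizing s c with
  | nil => simp [PySem.List.enumerate]
  | cons x xs ih =>
    rw [PySem.List.enumerate_cons]
    simp only [List.foldl_cons, List.map_cons, List.sum_cons]
    by_cases hx : x = "@" ∧ s < nrows * ncols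
    · rw [if_pos hx, ih, pv_scatter_char pvOffsets c nrows ncols s k, if_pos hx]
      have : pvHits nrows ncols s k
          = (pvOffsets.map (fun d =>
              if pvInB nrows ncols s d ∧ pvTgt ncols s d = k then (1 : Int) else 0)).sum := rfl
      rw [this]; ring
    · rw [if_neg hx, ih, if_neg hx]
      ring

-- enumerate-sum as range-sum
theorem pv_enum_sum (m : List String) (f : Int × String → Int) :
    ((PySem.List.enumerate m 0).map f).sum
      = ((List.range m.length).map (fun (j : Nat) => f ((j : Int), m.getD j ""))).sum := by
  congr 1
  apply List.ext_getElem
  · simp [PySem.List.length_enumerate]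
  · intro i h1 h2
    have hi : i < m.length := by simpa using h2
    simp [PySem.List.getElem_enumerate, List.getD_eq_getElem?_getD, List.getElem?_eq_getElem hi]

-- counting a single matching index over range L
theorem pv_range_indicator (L a : Nat) (C : Prop) [Decidable C] (ha : a < L) :
    ((List.range L).map (fun j => if j = a ∧ C then (1 : Int) else 0)).sum
      = if C then (1 : Int) else 0 := by
  by_cases hC : C
  · simp only [hC, and_true, if_true]
    have h1 : (fun (j : Nat) => if j = a then (1 : Int) else 0)
        = (fun (j : Nat) => if (j == a) = true then (1 : Int) else 0) := by
      funext j; simp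
    rw [h1, PySem.List.sum_map_ite_one_zero]
    have : List.countP (fun j => j == a) (List.range L) = List.count a (List.range L) := by
      simp [List.count, BEq.comm]
    rw [this, List.count_range, if_pos ha]
    rfl
  · simp [hC]

-- with a nonpositive column count no bounds guard ever passes
theorem pv_hits_zero_of_ncols_nonpos {nrows ncols : Int} (hc : ncols ≤ 0) (q k : Int) :
    pvHits nrows ncols q k = 0 := by
  unfold pvHits
  rw [List.map_congr_left (fun d _ => if_neg (fun h => by obtain ⟨⟨_, _, h3, h4⟩, _⟩ := h; omega))]
  simp

theorem pv_gather_zero_of_ncols_nonpos {nrows ncols : Int} (hc : ncols ≤ 0) (m : List String) (q : Int) :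
    pvGather m nrows ncols q = 0 := by
  unfold pvGather
  rw [List.map_congr_left (fun d _ => if_neg (fun h => by obtain ⟨⟨_, _, h3, h4⟩, _⟩ := h; omega))]
  simp

-- scatter bumps land only on in-grid keys
theorem pv_hits_zero_of_out {nrows ncols q k : Int} (hk : nrows * ncols ≤ k) :
    pvHits nrows ncols q k = 0 := by
  unfold pvHits
  rw [List.map_congr_left (fun d _ => if_neg (fun h => by
    have := pvTgt_bounds h.1
    omega))]
  simp

-- an out-of-grid cell sees at most the 3 cells of the grid row above it
theorem pv_gather_out_lt_four {nrows ncols k : Int} (m : List String)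
    (hc : 0 < ncols) (hk : nrows * ncols ≤ k) (hk0 : 0 ≤ k) :
    pvGather m nrows ncols k < 4 := by
  have hrow : nrows ≤ PySem.Int.floordiv k ncols := (PySem.Int.le_floordiv_iff_mul_le hc).mpr hk
  unfold pvGather pvOffsets
  simp only [List.map_cons, List.map_nil, List.sum_cons, List.sum_nil]
  have hz : ∀ (e : Int) (s : String), (if pvInB nrows ncols k ((0 : Int), e) ∧
      PySem.List.pyGetD m (pvTgt ncols k (0, e)) "" = s then (1 : Int) else 0) = 0 := by
    intro e s
    exact if_neg (fun h => by obtain ⟨⟨_, h2, _, _⟩, _⟩ := h; omega)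
  have hz1 : ∀ (e : Int) (s : String), (if pvInB nrows ncols k ((1 : Int), e) ∧
      PySem.List.pyGetD m (pvTgt ncols k (1, e)) "" = s then (1 : Int) else 0) = 0 := by
    intro e s
    exact if_neg (fun h => by obtain ⟨⟨_, h2, _, _⟩, _⟩ := h; omega)
  rw [hz (-1) "@", hz 1 "@", hz1 (-1) "@", hz1 0 "@", hz1 1 "@"]
  split_ifs <;> norm_num

-- the double-counting step: for an in-grid cell k the gathered sum equals the scattered bumps at k
theorem pv_gather_eq_hits (m : List String) (nrows ncols : Int) (k : Nat)
    (hc : 0 < ncols) (hkP : (k : Int) < nrows * ncols) :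
    ((List.range m.length).map (fun (j : Nat) =>
        if m.getD j "" = "@" ∧ (j : Int) < nrows * ncols
        then pvHits nrows ncols (j : Int) (k : Int) else 0)).sum
      = pvGather m nrows ncols (k : Int) := by
  have hk0 : (0 : Int) ≤ (k : Int) := by positivity
  have step1 : ∀ (j : Nat),
      (if m.getD j "" = "@" ∧ (j : Int) < nrows * ncols
       then pvHits nrows ncols (j : Int) (k : Int) else 0)
        = (pvOffsets.map (fun d =>
            if m.getD j "" = "@" ∧ (j : Int) < nrows * ncols ∧
                pvInB nrows ncols (j : Int) d ∧ pvTgt ncols (j : Int) d = (k : Int)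
            then (1 : Int) else 0)).sum := by
    intro j
    by_cases hj : m.getD j "" = "@" ∧ (j : Int) < nrows * ncols
    · rw [if_pos hj]
      unfold pvHits
      congr 1
      refine List.map_congr_left (fun d _ => ?_)
      exact if_congr (by tauto) rfl rfl
    · rw [if_neg hj]
      have : ∀ d ∈ pvOffsets, (if m.getD j "" = "@" ∧ (j : Int) < nrows * ncols ∧
          pvInB nrows ncols (j : Int) d ∧
          pvTgt ncols (j : Int) d = (k : Int) then (1 : Int) else 0) = 0 := by
        intro d _; rw [if_neg (by tauto)]
      rw [List.map_congr_left this]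
      simp
  rw [List.map_congr_left (fun j _ => step1 j), pv_sum_swap]
  have hperel : ∀ d ∈ pvOffsets,
      ((List.range m.length).map (fun (j : Nat) =>
          if m.getD j "" = "@" ∧ (j : Int) < nrows * ncols ∧
              pvInB nrows ncols (j : Int) d ∧ pvTgt ncols (j : Int) d = (k : Int)
          then (1 : Int) else 0)).sum
        = (if pvInB nrows ncols (k : Int) (-d.1, -d.2) ∧
              PySem.List.pyGetD m (pvTgt ncols (k : Int) (-d.1, -d.2)) "" = "@"
           then (1 : Int) else 0) := by
    intro d _
    by_cases hB : pvInB nrows ncols (k : Int) (-d.1, -d.2)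
    · have htb := pvTgt_bounds hB
      by_cases hat : PySem.List.pyGetD m (pvTgt ncols (k : Int) (-d.1, -d.2)) "" = "@"
      · have hat' : m.getD (pvTgt ncols (k : Int) (-d.1, -d.2)).toNat "" = "@" := by
          rw [← PySem.List.pyGetD_of_nonneg m "" htb.1]; exact hat
        have hj0L : (pvTgt ncols (k : Int) (-d.1, -d.2)).toNat < m.length := by
          by_contra hcon
          rw [List.getD_eq_getElem?_getD, List.getElem?_eq_none (by omega)] at hat'
          exact absurd hat' (by simp)
        have hiff : ∀ (j : Nat), j < m.length →
            ((m.getD j "" = "@" ∧ (j : Int) < nrows * ncols ∧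
                pvInB nrows ncols (j : Int) d ∧ pvTgt ncols (j : Int) d = (k : Int))
              ↔ (j = (pvTgt ncols (k : Int) (-d.1, -d.2)).toNat ∧
                 m.getD (pvTgt ncols (k : Int) (-d.1, -d.2)).toNat "" = "@")) := by
          intro j hj
          constructor
          · rintro ⟨hatj, hjP, hbd, htg⟩
            have := pv_adj_fwd hc (by positivity) hjP ⟨hbd, htg⟩
            have hje : pvTgt ncols (k : Int) (-d.1, -d.2) = (j : Int) := this.2
            have hjn : (pvTgt ncols (k : Int) (-d.1, -d.2)).toNat = j := by omega
            exact ⟨hjn.symm, by rw [hjn]; exact hatj⟩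
          · rintro ⟨hje, _⟩
            subst hje
            have := pv_adj_fwd (d := (-d.1, -d.2)) hc hk0 hkP
              ⟨hB, (Int.toNat_of_nonneg htb.1).symm⟩
            simp only [neg_neg] at this
            exact ⟨hat', by omega, ⟨this.1, this.2⟩⟩
        rw [List.map_congr_left (fun j hj =>
          if_congr (hiff j (by simpa using hj)) rfl rfl),
          pv_range_indicator _ _ _ hj0L, if_pos hat', if_pos ⟨hB, hat⟩]
      · rw [if_neg (by tauto)]
        have hzero : ∀ (j : Nat), j ∈ List.range m.length →
            (if m.getD j "" = "@" ∧ (j : Int) < nrows * ncols ∧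
                pvInB nrows ncols (j : Int) d ∧
                pvTgt ncols (j : Int) d = (k : Int) then (1 : Int) else 0) = 0 := by
          intro j hj
          rw [if_neg]
          rintro ⟨hatj, hjP, hbd, htg⟩
          have := pv_adj_fwd hc (by positivity) hjP ⟨hbd, htg⟩
          have hjn : (pvTgt ncols (k : Int) (-d.1, -d.2)).toNat = j := by
            have := this.2; omega
          exact hat (by rw [PySem.List.pyGetD_of_nonneg m "" (pvTgt_bounds this.1).1, hjn]; exact hatj)
        rw [List.map_congr_left hzero]
        simp
    · have hzero : ∀ (j : Nat), j ∈ List.range m.length →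
          (if m.getD j "" = "@" ∧ (j : Int) < nrows * ncols ∧
              pvInB nrows ncols (j : Int) d ∧
              pvTgt ncols (j : Int) d = (k : Int) then (1 : Int) else 0) = 0 := by
        intro j hj
        rw [if_neg]
        rintro ⟨hatj, hjP, hbd, htg⟩
        exact hB (pv_adj_fwd hc (by positivity) hjP ⟨hbd, htg⟩).1
      rw [List.map_congr_left hzero, if_neg (by tauto)]
      simp
  rw [List.map_congr_left hperel]
  have hperm : (pvOffsets.map (fun d => ((-d.1, -d.2) : Int × Int))).Perm pvOffsets := by decide
  unfold pvGather
  calc (pvOffsets.map (fun d =>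
          if pvInB nrows ncols (k : Int) (-d.1, -d.2) ∧
              PySem.List.pyGetD m (pvTgt ncols (k : Int) (-d.1, -d.2)) "" = "@"
          then (1 : Int) else 0)).sum
      = ((pvOffsets.map (fun d => ((-d.1, -d.2) : Int × Int))).map (fun d =>
          if pvInB nrows ncols (k : Int) d ∧
              PySem.List.pyGetD m (pvTgt ncols (k : Int) d) "" = "@"
          then (1 : Int) else 0)).sum := by rw [List.map_map]; rfl
    _ = (pvOffsets.map (fun d =>
          if pvInB nrows ncols (k : Int) d ∧
              PySem.List.pyGetD m (pvTgt ncols (k : Int) d) "" = "@"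
          then (1 : Int) else 0)).sum := (hperm.map _).sum_eq

-- A's nested fold, re-expressed as one map with the gathered neighbor sum
theorem pvA_map (m : List String) (nrows ncols : Int) :
    find_accessible_rolls m nrows ncols = (PySem.List.enumerate m).map (fun pi =>
      if pi.2 = "." then 0 else if pvGather m nrows ncols pi.1 < 4 then (1 : Int) else 0) := by
  unfold find_accessible_rolls
  have hin : ∀ (q : Int), (pvOffsets.foldl (fun s indx =>
      if 0 ≤ PySem.Int.floordiv q ncols + indx.1 ∧ PySem.Int.floordiv q ncols + indx.1 < nrows ∧
          0 ≤ PySem.Int.mod q ncols + indx.2 ∧ PySem.Int.mod q ncols + indx.2 < ncols ∧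
          PySem.List.pyGetD m ((PySem.Int.floordiv q ncols + indx.1) * ncols +
            (PySem.Int.mod q ncols + indx.2)) "" = "@"
      then s ++ [(1 : Int)] else s ++ [0]) []).sum = pvGather m nrows ncols q := by
    intro q
    have hstep : (fun (s : List Int) (indx : Int × Int) =>
        if 0 ≤ PySem.Int.floordiv q ncols + indx.1 ∧ PySem.Int.floordiv q ncols + indx.1 < nrows ∧
            0 ≤ PySem.Int.mod q ncols + indx.2 ∧ PySem.Int.mod q ncols + indx.2 < ncols ∧
            PySem.List.pyGetD m ((PySem.Int.floordiv q ncols + indx.1) * ncols +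
              (PySem.Int.mod q ncols + indx.2)) "" = "@"
        then s ++ [(1 : Int)] else s ++ [0])
        = (fun s indx => s ++ [if pvInB nrows ncols q indx ∧
            PySem.List.pyGetD m (pvTgt ncols q indx) "" = "@" then (1 : Int) else 0]) := by
      funext s indx
      rw [apply_ite (fun z => s ++ [z])]
      exact if_congr (by unfold pvInB pvTgt; tauto) rfl rfl
    rw [hstep, PySem.List.foldl_append_singleton_eq_map]
    rfl
  have hstep2 : (fun (accessible_rolls : List Int) (pi : Int × String) =>
      if pi.2 = "." then accessible_rolls ++ [(0 : Int)]
      else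
        if (pvOffsets.foldl (fun s indx =>
          if 0 ≤ PySem.Int.floordiv pi.1 ncols + indx.1 ∧ PySem.Int.floordiv pi.1 ncols + indx.1 < nrows ∧
              0 ≤ PySem.Int.mod pi.1 ncols + indx.2 ∧ PySem.Int.mod pi.1 ncols + indx.2 < ncols ∧
              PySem.List.pyGetD m ((PySem.Int.floordiv pi.1 ncols + indx.1) * ncols +
                (PySem.Int.mod pi.1 ncols + indx.2)) "" = "@"
          then s ++ [(1 : Int)] else s ++ [0]) []).sum < 4
        then accessible_rolls ++ [1] else accessible_rolls ++ [0])
      = (fun accessible_rolls pi => accessible_rolls ++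
          [if pi.2 = "." then 0 else if pvGather m nrows ncols pi.1 < 4 then (1 : Int) else 0]) := by
    funext acc pi
    by_cases h : pi.2 = "."
    · simp [h]
    · rw [if_neg h, if_neg h, hin pi.1]
      rw [apply_ite (fun z => acc ++ [z])]
  show (PySem.List.enumerate m).foldl _ [] = _
  rw [show ((PySem.List.enumerate m).foldl (fun accessible_rolls pi =>
      if pi.2 = "." then accessible_rolls ++ [0]
      else
        let surrounding_spots := pvOffsets.foldl (fun s indx =>
          let rc := (PySem.Int.floordiv pi.1 ncols, PySem.Int.mod pi.1 ncols)
          let check_row := rc.1 + indx.1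
          let check_col := rc.2 + indx.2
          let this_pos := check_row * ncols + check_col
          if 0 ≤ check_row ∧ check_row < nrows ∧ 0 ≤ check_col ∧ check_col < ncols ∧
              PySem.List.pyGetD m this_pos "" = "@"
          then s ++ [(1 : Int)] else s ++ [0]) []
        if surrounding_spots.sum < 4 then accessible_rolls ++ [1] else accessible_rolls ++ [0]) [])
    = (PySem.List.enumerate m).foldl (fun accessible_rolls pi => accessible_rolls ++
        [if pi.2 = "." then 0 else if pvGather m nrows ncols pi.1 < 4 then (1 : Int) else 0]) [] from by
      rw [← hstep2]]
  rw [PySem.List.foldl_append_singleton_eq_map]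
  simp

-- ===== VERDICT (by name: the statements are the Claim_ definitions above) =====
theorem find_accessible_rolls_spec : Claim_equal_find_accessible_rolls := by
  intro m nrows ncols _ _
  unfold Spec_find_accessible_rolls
  rw [pvA_map]
  simp only [find_accessible_rolls_alt]
  refine List.map_congr_left ?_
  intro pi hpi
  rw [PySem.List.mem_enumerate_iff] at hpi
  obtain ⟨j, hj, rfl⟩ := hpi
  simp only [zero_add]
  by_cases hdot : m[j] = "."
  · rw [if_pos hdot, if_pos hdot]
  · rw [if_neg hdot, if_neg hdot]
    have hcnt : PySem.Dict.getD
        ((PySem.List.enumerate m).foldl (fun counts pi =>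
          if pi.2 = "@" ∧ pi.1 < nrows * ncols then
            pvOffsets.foldl (fun counts d =>
              if 0 ≤ PySem.Int.floordiv pi.1 ncols + d.1 ∧ PySem.Int.floordiv pi.1 ncols + d.1 < nrows ∧
                  0 ≤ PySem.Int.mod pi.1 ncols + d.2 ∧ PySem.Int.mod pi.1 ncols + d.2 < ncols then
                PySem.Dict.insert counts ((PySem.Int.floordiv pi.1 ncols + d.1) * ncols + (PySem.Int.mod pi.1 ncols + d.2))
                  (PySem.Dict.getD counts ((PySem.Int.floordiv pi.1 ncols + d.1) * ncols + (PySem.Int.mod pi.1 ncols + d.2)) 0 + 1)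
              else counts) counts
          else counts) (PySem.Dict.empty : PySem.Dict Int Int)) (j : Int) 0
        = ((PySem.List.enumerate m).map (fun pi =>
            if pi.2 = "@" ∧ pi.1 < nrows * ncols then pvHits nrows ncols pi.1 (j : Int) else 0)).sum := by
      rw [pv_counts_char m nrows ncols 0 PySem.Dict.empty (j : Int), PySem.Dict.getD_empty]
      ring
    rw [hcnt]
    by_cases hc : 0 < ncols
    · by_cases hin : (j : Int) < nrows * ncols
      · rw [pv_enum_sum m (fun pi =>
            if pi.2 = "@" ∧ pi.1 < nrows * ncols then pvHits nrows ncols pi.1 (j : Int) else 0),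
          pv_gather_eq_hits m nrows ncols j hc hin]
      · have hS : ((PySem.List.enumerate m).map (fun pi =>
            if pi.2 = "@" ∧ pi.1 < nrows * ncols then pvHits nrows ncols pi.1 (j : Int) else 0)).sum
            = 0 := by
          rw [List.map_congr_left (fun pi _ => show _ = (0 : Int) from by
            split_ifs with h
            · exact pv_hits_zero_of_out (by omega)
            · rfl)]
          simp
        rw [hS, if_pos (pv_gather_out_lt_four m hc (by omega) (by positivity)),
          if_pos (by norm_num)]
    · have hle : ncols ≤ 0 := by omega
      rw [pv_gather_zero_of_ncols_nonpos hle]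
      have hS : ((PySem.List.enumerate m).map (fun pi =>
          if pi.2 = "@" ∧ pi.1 < nrows * ncols then pvHits nrows ncols pi.1 (j : Int) else 0)).sum
          = 0 := by
        rw [List.map_congr_left (fun pi _ => show _ = (0 : Int) from by
          split_ifs with h
          · exact pv_hits_zero_of_ncols_nonpos hle _ _
          · rfl)]
        simp
      rw [hS]
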